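-- pv_equiv track=rewrite | github.com/scottfletcher/AITA | praw_comments.py | extract_comment_vote
-- ===== SOURCE A (Python) =====
-- def extract_comment_vote(text):
-- 	nta = ['NTA', 'YWNBTA', 'Nta', 'Ywnbta', 'nta ', 'ywnbta', 'WNBTA', 'Wnbta']
-- 	nah = ['NAH', 'Nah', 'nah']
-- 	yta = ['YTA', 'YWBTA', 'WBTA', 'Yta', 'Ywbta', 'Wbta', 'yta ', 'ywbta', 'wbta', 'YAH']
-- 	esh = ['ESH', 'Esh']
-- 	shp = ['SHP', 'Shp', 'shp', 'SHITPO', 'Shitpo', 'shitpo']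
-- 	info = ['INFO', 'Info']
-- 	classes = [nta, nah, yta, esh, shp, info]
-- 	classes_string = ['nta', 'nah', 'yta', 'esh', 'shp', 'info', 'other']
--
-- 	"""
-- 	class indices
-- 				NTA	...	0
-- 				NAH	...	1
-- 				YTA	...	2
-- 				ESH	...	3
-- 				SHP	...	4
-- 				INFO	...	5
-- 				other	...	6
-- 	"""
--
-- 	class_index = 6	#starts at 6, assuming no class found
-- 	lowest_i = -1 #stores position of first occurence of a keyword
-- 	for class_i in range(len(classes)):
-- 		if lowest_i == 0:
-- 			break
-- 		for keyword in classes[class_i]: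
-- 			found_i = text.find(keyword)
-- 			if found_i >= 0 and (found_i < lowest_i or lowest_i < 0):
-- 				lowest_i = found_i
-- 				class_index = class_i
--
-- 	return classes_string[class_index]
-- ===== SOURCE B (Python) =====
-- def extract_comment_vote(text):
-- 	# One forward pass over text positions; at each position try the keywords
-- 	# in original (class, keyword) order and return on the first match.
-- 	keywords = [
-- 		('NTA', 0), ('YWNBTA', 0), ('Nta', 0), ('Ywnbta', 0), ('nta ', 0), ('ywnbta', 0), ('WNBTA', 0), ('Wnbta', 0),
-- 		('NAH', 1), ('Nah', 1), ('nah', 1),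
-- 		('YTA', 2), ('YWBTA', 2), ('WBTA', 2), ('Yta', 2), ('Ywbta', 2), ('Wbta', 2), ('yta ', 2), ('ywbta', 2), ('wbta', 2), ('YAH', 2),
-- 		('ESH', 3), ('Esh', 3),
-- 		('SHP', 4), ('Shp', 4), ('shp', 4), ('SHITPO', 4), ('Shitpo', 4), ('shitpo', 4),
-- 		('INFO', 5), ('Info', 5),
-- 	]
-- 	classes_string = ['nta', 'nah', 'yta', 'esh', 'shp', 'info', 'other']
-- 	for i in range(len(text)):
-- 		for kw, c in keywords:
-- 			if text.startswith(kw, i):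
-- 				return classes_string[c]
-- 	return 'other'
-- ===== Notes on version B (the rewrite author's own statement) =====
-- stated objective: alternative
-- what changed: Instead of running text.find once per keyword (31 whole-text scans) and keeping a running minimum position with the strict-< tie-break, B makes a single forward scan over text positions and returns the class of the first keyword (in original order) that matches via text.startswith(kw, i), which yields the same global-minimum-position, first-keyword-wins result.
import Mathlib
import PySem

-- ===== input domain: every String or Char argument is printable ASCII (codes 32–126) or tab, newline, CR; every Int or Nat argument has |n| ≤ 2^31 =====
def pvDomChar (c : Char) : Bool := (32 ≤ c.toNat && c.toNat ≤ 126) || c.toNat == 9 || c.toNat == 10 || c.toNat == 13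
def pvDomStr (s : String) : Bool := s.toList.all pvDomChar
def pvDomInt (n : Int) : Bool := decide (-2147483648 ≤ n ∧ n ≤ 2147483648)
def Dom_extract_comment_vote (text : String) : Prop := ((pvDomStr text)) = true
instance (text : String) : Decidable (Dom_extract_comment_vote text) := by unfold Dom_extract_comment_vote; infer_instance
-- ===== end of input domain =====

-- B replaces A's repeated whole-text `find` scans by a single forward scan over
-- positions that returns at the first matching (position, keyword-order) pair;
-- objective: alternative (different algorithm, same result).


-- ===== PORT A =====

-- the six keyword classes (nta, nah, yta, esh, shp, info), as lists of char lists
def pvAClasses : List (List (List Char)) :=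
  [["NTA".toList, "YWNBTA".toList, "Nta".toList, "Ywnbta".toList, "nta ".toList,
    "ywnbta".toList, "WNBTA".toList, "Wnbta".toList],
   ["NAH".toList, "Nah".toList, "nah".toList],
   ["YTA".toList, "YWBTA".toList, "WBTA".toList, "Yta".toList, "Ywbta".toList,
    "Wbta".toList, "yta ".toList, "ywbta".toList, "wbta".toList, "YAH".toList],
   ["ESH".toList, "Esh".toList],
   ["SHP".toList, "Shp".toList, "shp".toList, "SHITPO".toList, "Shitpo".toList, "shitpo".toList],
   ["INFO".toList, "Info".toList]]

def pvAClassesString : List String := ["nta", "nah", "yta", "esh", "shp", "info", "other"]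

-- one keyword update: found_i = text.find(keyword); if found_i >= 0 and (found_i < lowest_i or lowest_i < 0): ...
def pvAStep (t : List Char) (ci : Nat) (st : Int × Nat) (kw : List Char) : Int × Nat :=
  if 0 ≤ PySem.Chars.find t kw ∧ (PySem.Chars.find t kw < st.1 ∨ st.1 < 0)
  then (PySem.Chars.find t kw, ci) else st

-- outer loop over classes, with the `if lowest_i == 0: break` at the top of each iteration
def pvAOuter (t : List Char) : List (List (List Char)) → Nat → (Int × Nat) → Int × Nat
  | [], _, st => st
  | c :: rest, ci, st =>
      if st.1 = 0 then st else pvAOuter t rest (ci + 1) (c.foldl (pvAStep t ci) st)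

def extract_comment_vote (text : String) : String :=
  PySem.List.pyGetD pvAClassesString
    (((pvAOuter text.toList pvAClasses 0 (-1, 6)).2 : Nat) : Int) ""

-- ===== PORT B =====

-- flattened (keyword, class index) list, original order
def pvKeywords : List (List Char × Nat) :=
  [("NTA".toList, 0), ("YWNBTA".toList, 0), ("Nta".toList, 0), ("Ywnbta".toList, 0),
   ("nta ".toList, 0), ("ywnbta".toList, 0), ("WNBTA".toList, 0), ("Wnbta".toList, 0),
   ("NAH".toList, 1), ("Nah".toList, 1), ("nah".toList, 1),
   ("YTA".toList, 2), ("YWBTA".toList, 2), ("WBTA".toList, 2), ("Yta".toList, 2),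
   ("Ywbta".toList, 2), ("Wbta".toList, 2), ("yta ".toList, 2), ("ywbta".toList, 2),
   ("wbta".toList, 2), ("YAH".toList, 2),
   ("ESH".toList, 3), ("Esh".toList, 3),
   ("SHP".toList, 4), ("Shp".toList, 4), ("shp".toList, 4), ("SHITPO".toList, 4),
   ("Shitpo".toList, 4), ("shitpo".toList, 4),
   ("INFO".toList, 5), ("Info".toList, 5)]

def pvBClassesString : List String := ["nta", "nah", "yta", "esh", "shp", "info", "other"]

-- inner for: first keyword matching at the current position (text.startswith(kw, i))
def pvBMatch (s : List Char) : List (List Char × Nat) → Option Nat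
  | [] => none
  | (kw, c) :: ks => if PySem.Chars.startswith s kw then some c else pvBMatch s ks

-- outer for over positions i of range(len(text)), as recursion over suffixes
def pvBScan (kws : List (List Char × Nat)) : List Char → Option Nat
  | [] => none
  | c :: tail =>
      match pvBMatch (c :: tail) kws with
      | some k => some k
      | none => pvBScan kws tail

def extract_comment_vote_alt (text : String) : String :=
  match pvBScan pvKeywords text.toList with
  | some c => PySem.List.pyGetD pvBClassesString ((c : Nat) : Int) ""
  | none => "other"

-- ===== PRECONDITION & SPEC =====
def Spec_extract_comment_vote (text : String) (out : String) : Prop := out = extract_comment_vote_alt text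
instance (text : String) (out : String) : Decidable (Spec_extract_comment_vote text out) := by unfold Spec_extract_comment_vote; infer_instance

-- ===== CLAIM (what is proved, stated in full; the proofs are below) =====
def Claim_equal_extract_comment_vote : Prop := ∀ (text : String), Dom_extract_comment_vote text → Spec_extract_comment_vote text (extract_comment_vote text)

-- ===== LEMMAS AND PROOFS =====

-- A's keyword update, abstracted over the precomputed find value
def pvStep' (st : Int × Nat) (p : Int × Nat) : Int × Nat :=
  if 0 ≤ p.1 ∧ (p.1 < st.1 ∨ st.1 < 0) then (p.1, p.2) else st

-- how a find value changes when one character is prepended and no match occurs at 0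
def pvShift (v : Int) : Int := if v < 0 then -1 else v + 1

-- A's outer loop without the (semantically inert) break
def pvANb (t : List Char) : List (List (List Char)) → Nat → (Int × Nat) → Int × Nat
  | [], _, st => st
  | c :: rest, ci, st => pvANb t rest (ci + 1) (c.foldl (pvAStep t ci) st)

-- classes flattened to (keyword, class index) pairs starting at index ci
def pvFlat : List (List (List Char)) → Nat → List (List Char × Nat)
  | [], _ => []
  | c :: rest, ci => c.map (fun kw => (kw, ci)) ++ pvFlat rest (ci + 1)

lemma pvAStep_zero (t : List Char) (ci : Nat) (st : Int × Nat) (kw : List Char)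
    (h : st.1 = 0) : pvAStep t ci st kw = st := by
  simp only [pvAStep, h]
  split_ifs with hc
  · exact absurd hc (by omega)
  · rfl

lemma pvAInner_zero (t : List Char) (ci : Nat) (kws : List (List Char)) (st : Int × Nat)
    (h : st.1 = 0) : kws.foldl (pvAStep t ci) st = st := by
  induction kws with
  | nil => rfl
  | cons kw rest ih => simp only [List.foldl_cons, pvAStep_zero t ci st kw h, ih]

lemma pvANb_zero (t : List Char) (cls : List (List (List Char))) (ci : Nat) (st : Int × Nat)
    (h : st.1 = 0) : pvANb t cls ci st = st := by
  induction cls generalizing ci with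
  | nil => rfl
  | cons c rest ih =>
      rw [pvANb, pvAInner_zero t ci c st h]
      exact ih _

lemma pvAOuter_eq_pvANb (t : List Char) (cls : List (List (List Char))) (ci : Nat)
    (st : Int × Nat) : pvAOuter t cls ci st = pvANb t cls ci st := by
  induction cls generalizing ci st with
  | nil => rfl
  | cons c rest ih =>
      simp only [pvAOuter, pvANb]
      split_ifs with h
      · rw [pvAInner_zero t ci c st h, pvANb_zero t rest (ci+1) st h]
      · exact ih _ _

-- the inner class loop as a pvStep' fold over precomputed find values
lemma pvAInner_eq (t : List Char) (ci : Nat) (c : List (List Char)) (st : Int × Nat) :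
    c.foldl (pvAStep t ci) st
      = ((c.map (fun kw => (kw, ci))).map
          (fun p => (PySem.Chars.find t p.1, p.2))).foldl pvStep' st := by
  rw [List.map_map, List.foldl_map]
  rfl

-- A's nested loops = fold of pvStep' over the flattened (find value, class) pairs
lemma pvANb_flat (t : List Char) (cls : List (List (List Char))) (ci : Nat) (st : Int × Nat) :
    pvANb t cls ci st
      = ((pvFlat cls ci).map (fun p => (PySem.Chars.find t p.1, p.2))).foldl pvStep' st := by
  induction cls generalizing ci st with
  | nil => rfl
  | cons c rest ih =>
      rw [pvANb, pvFlat, List.map_append, List.foldl_append, ← pvAInner_eq, ih]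

lemma pvFlat_classes : pvFlat pvAClasses 0 = pvKeywords := by rfl

-- zero state is absorbing for pvStep'
lemma pvStep'_fold_zero (vs : List (Int × Nat)) (st : Int × Nat) (h : st.1 = 0) :
    vs.foldl pvStep' st = st := by
  induction vs generalizing st with
  | nil => rfl
  | cons v rest ih =>
      have hst : pvStep' st v = st := by
        simp only [pvStep', h]
        split_ifs with hc
        · exact absurd hc (by omega)
        · rfl
      simp only [List.foldl_cons, hst, ih st h]

-- first pair with value 0 wins the fold
lemma pvStep'_fold_firstZero (vs : List (Int × Nat)) (st : Int × Nat) (c : Nat)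
    (hst : st.1 ≠ 0)
    (h : vs.findSome? (fun v => if v.1 = 0 then some v.2 else none) = some c) :
    (vs.foldl pvStep' st).2 = c := by
  induction vs generalizing st with
  | nil => simp [List.findSome?] at h
  | cons v rest ih =>
      rw [List.findSome?_cons] at h
      by_cases hv : v.1 = 0
      · simp only [hv] at h
        obtain rfl : v.2 = c := by simpa using h
        have : pvStep' st v = (0, v.2) := by
          simp only [pvStep', hv]
          rw [if_pos ⟨le_refl 0, by omega⟩]
        rw [List.foldl_cons, this, pvStep'_fold_zero rest (0, v.2) rfl]
      · simp only [if_neg hv] at h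
        have hne : (pvStep' st v).1 ≠ 0 := by
          simp only [pvStep']
          split_ifs with hc
          · simpa using hv
          · exact hst
        rw [List.foldl_cons]
        exact ih _ hne h

-- no pair has a nonnegative value: the fold is the identity
lemma pvStep'_fold_allNeg (vs : List (Int × Nat)) (st : Int × Nat)
    (h : ∀ v ∈ vs, v.1 = -1) : vs.foldl pvStep' st = st := by
  induction vs generalizing st with
  | nil => rfl
  | cons v rest ih =>
      have hv := h v (by simp)
      have : pvStep' st v = st := by
        simp only [pvStep', hv]
        rw [if_neg (by omega)]
      rw [List.foldl_cons, this]
      exact ih st (fun w hw => h w (by simp [hw]))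

-- shifting every value (and the start state) commutes with the fold
lemma pvStep'_fold_shift (vs : List (Int × Nat)) (st : Int × Nat)
    (hst : -1 ≤ st.1) (hvs : ∀ v ∈ vs, -1 ≤ v.1) :
    (vs.map (fun v => (pvShift v.1, v.2))).foldl pvStep' (pvShift st.1, st.2)
      = (pvShift (vs.foldl pvStep' st).1, (vs.foldl pvStep' st).2) := by
  induction vs generalizing st with
  | nil => rfl
  | cons v rest ih =>
      have hv := hvs v (by simp)
      have hcond : (0 ≤ pvShift v.1 ∧ (pvShift v.1 < pvShift st.1 ∨ pvShift st.1 < 0))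
          ↔ (0 ≤ v.1 ∧ (v.1 < st.1 ∨ st.1 < 0)) := by
        simp only [pvShift]
        split_ifs with h1 h2 h2 <;> omega
      have hstep : pvStep' (pvShift st.1, st.2) (pvShift v.1, v.2)
          = (pvShift (pvStep' st v).1, (pvStep' st v).2) := by
        simp only [pvStep']
        by_cases hc : 0 ≤ v.1 ∧ (v.1 < st.1 ∨ st.1 < 0)
        · rw [if_pos (hcond.mpr hc), if_pos hc]
        · rw [if_neg (fun h => hc (hcond.mp h)), if_neg hc]
      have hst' : -1 ≤ (pvStep' st v).1 := by
        simp only [pvStep']; split_ifs with hc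
        · exact le_trans (by omega) hc.1
        · exact hst
      simp only [List.map_cons, List.foldl_cons, hstep]
      exact ih (pvStep' st v) hst' (fun w hw => hvs w (by simp [hw]))

-- find s kw = 0 iff kw matches at position 0
lemma pvFind_zero_iff (s kw : List Char) :
    PySem.Chars.find s kw = 0 ↔ PySem.Chars.startswith s kw = true := by
  constructor
  · intro h
    have hspec := PySem.Chars.find_spec (s := s) (sub := kw) (by omega)
    rw [PySem.Chars.startswith_iff]
    simpa [h] using hspec.1
  · intro h
    rw [PySem.Chars.startswith_iff] at h
    have hnn : 0 ≤ PySem.Chars.find s kw := by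
      rw [PySem.Chars.find_nonneg_iff]
      exact h.isInfix
    have hspec := PySem.Chars.find_spec (s := s) (sub := kw) hnn
    by_contra hne
    have hpos : 0 < (PySem.Chars.find s kw).toNat := by omega
    exact hspec.2 0 hpos (by simpa using h)

-- find pinned by a witness position and minimality
lemma pvFind_eq_of (s kw : List Char) (i : Nat) (h1 : kw <+: s.drop i)
    (h2 : ∀ j < i, ¬ kw <+: s.drop j) : PySem.Chars.find s kw = (i : Int) := by
  have hnn : 0 ≤ PySem.Chars.find s kw := by
    rw [PySem.Chars.find_nonneg_iff]
    rw [← PySem.Chars.isIn_iff_infix, ← PySem.Chars.exists_prefix_drop_iff_isIn]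
    exact ⟨i, h1⟩
  have hspec := PySem.Chars.find_spec (s := s) (sub := kw) hnn
  have : (PySem.Chars.find s kw).toNat = i := by
    rcases lt_trichotomy (PySem.Chars.find s kw).toNat i with h | h | h
    · exact absurd hspec.1 (h2 _ h)
    · exact h
    · exact absurd h1 (hspec.2 i h)
  omega

-- prepending a non-matching character shifts the find value
lemma pvFind_cons (c : Char) (tl kw : List Char)
    (h : ¬ PySem.Chars.startswith (c :: tl) kw = true) :
    PySem.Chars.find (c :: tl) kw = pvShift (PySem.Chars.find tl kw) := by
  have hp : ¬ kw <+: (c :: tl) := by rwa [← PySem.Chars.startswith_iff]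
  rcases lt_or_ge (PySem.Chars.find tl kw) 0 with hf | hf
  · have hf1 : PySem.Chars.find tl kw = -1 := by
      have := PySem.Chars.neg_one_le_find tl kw; omega
    have hni : ¬ kw <:+: tl := by rwa [← PySem.Chars.find_eq_neg_one_iff]
    have : PySem.Chars.find (c :: tl) kw = -1 := by
      rw [PySem.Chars.find_eq_neg_one_iff]
      intro hinf
      have : ∃ j, kw <+: (c :: tl).drop j := by
        rw [PySem.Chars.exists_prefix_drop_iff_isIn, PySem.Chars.isIn_iff_infix]
        exact hinf
      obtain ⟨j, hj⟩ := this
      cases j with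
      | zero => exact hp (by simpa using hj)
      | succ n =>
          apply hni
          rw [← PySem.Chars.isIn_iff_infix, ← PySem.Chars.exists_prefix_drop_iff_isIn]
          exact ⟨n, by simpa using hj⟩
    rw [this, hf1]; rfl
  · have hspec := PySem.Chars.find_spec (s := tl) (sub := kw) hf
    have heq : PySem.Chars.find (c :: tl) kw = ((PySem.Chars.find tl kw).toNat + 1 : Nat) := by
      apply pvFind_eq_of
      · simpa using hspec.1
      · intro j hj
        cases j with
        | zero => simpa using hp
        | succ n => exact fun hpre => hspec.2 n (by omega) (by simpa using hpre)
    rw [heq]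
    simp only [pvShift]
    rw [if_neg (by omega)]
    push_cast
    omega

-- if no keyword matches, every startswith test failed
lemma pvBMatch_none (s : List Char) (K : List (List Char × Nat)) (h : pvBMatch s K = none) :
    ∀ p ∈ K, ¬ PySem.Chars.startswith s p.1 = true := by
  induction K with
  | nil => intro p hp; simp at hp
  | cons q rest ih =>
      obtain ⟨kw, cc⟩ := q
      intro p hp
      simp only [pvBMatch] at h
      by_cases hq : PySem.Chars.startswith s kw = true
      · rw [if_pos hq] at h
        exact absurd h (by simp)
      · rw [if_neg hq] at h
        rcases List.mem_cons.mp hp with rfl | hp'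
        · exact hq
        · exact ih h p hp'

-- first match in order = first zero among the find values
lemma pvBMatch_eq_firstZero (s : List Char) (K : List (List Char × Nat)) :
    pvBMatch s K
      = (K.map (fun p => (PySem.Chars.find s p.1, p.2))).findSome?
          (fun v => if v.1 = 0 then some v.2 else none) := by
  induction K with
  | nil => rfl
  | cons p rest ih =>
      obtain ⟨kw, c⟩ := p
      simp only [pvBMatch, List.map_cons, List.findSome?_cons]
      by_cases h : PySem.Chars.startswith s kw = true
      · rw [if_pos h, (pvFind_zero_iff s kw).mpr h, if_pos rfl]
      · rw [if_neg h, if_neg (fun h0 => h ((pvFind_zero_iff s kw).mp h0)), ih]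

-- main induction: A's fold over find values picks the class B's positional scan picks
lemma pvMain (t : List Char) (K : List (List Char × Nat)) (hK : ∀ p ∈ K, p.1 ≠ ([] : List Char)) :
    ((K.map (fun p => (PySem.Chars.find t p.1, p.2))).foldl pvStep' (-1, 6)).2
      = (pvBScan K t).getD 6 := by
  induction t with
  | nil =>
      have hall : ∀ v ∈ K.map (fun p => (PySem.Chars.find ([] : List Char) p.1, p.2)), v.1 = -1 := by
        intro v hv
        rw [List.mem_map] at hv
        obtain ⟨p, hp, rfl⟩ := hv
        rw [PySem.Chars.find_eq_neg_one_iff]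
        intro hinf
        exact hK p hp (List.eq_nil_of_infix_nil hinf)
      rw [pvStep'_fold_allNeg _ _ hall]
      rfl
  | cons c tl ih =>
      cases hm : pvBMatch (c :: tl) K with
      | some k =>
          have : (pvBScan K (c :: tl)) = some k := by simp [pvBScan, hm]
          rw [this]
          apply pvStep'_fold_firstZero _ _ _ (by norm_num)
          rw [← pvBMatch_eq_firstZero]
          exact hm
      | none =>
          have hscan : pvBScan K (c :: tl) = pvBScan K tl := by simp [pvBScan, hm]
          rw [hscan, ← ih]
          have hnm := pvBMatch_none (c :: tl) K hm
          have hmapeq : K.map (fun p => (PySem.Chars.find (c :: tl) p.1, p.2))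
              = (K.map (fun p => (PySem.Chars.find tl p.1, p.2))).map
                  (fun v => (pvShift v.1, v.2)) := by
            rw [List.map_map]
            apply List.map_congr_left
            intro p hp
            simp only [Function.comp]
            rw [pvFind_cons c tl p.1 (hnm p hp)]
          rw [hmapeq]
          have hvals : ∀ v ∈ K.map (fun p => (PySem.Chars.find tl p.1, p.2)), -1 ≤ v.1 := by
            intro v hv
            rw [List.mem_map] at hv
            obtain ⟨p, hp, rfl⟩ := hv
            exact PySem.Chars.neg_one_le_find tl p.1
          have hsh := pvStep'_fold_shift (K.map (fun p => (PySem.Chars.find tl p.1, p.2)))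
            ((-1 : Int), (6 : Nat)) (by norm_num) hvals
          dsimp only at hsh
          have h0 : pvShift (-1) = -1 := by decide
          rw [h0] at hsh
          rw [hsh]

lemma pvKeywords_ne_nil : ∀ p ∈ pvKeywords, p.1 ≠ ([] : List Char) := by decide

-- ===== VERDICT (by name: the statement is the Claim_ definition above) =====
theorem extract_comment_vote_spec : Claim_equal_extract_comment_vote := by
  intro text _
  unfold Spec_extract_comment_vote extract_comment_vote extract_comment_vote_alt
  rw [pvAOuter_eq_pvANb, pvANb_flat, pvFlat_classes]
  have h := pvMain text.toList pvKeywords pvKeywords_ne_nil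
  cases hs : pvBScan pvKeywords text.toList with
  | some c =>
      rw [hs] at h
      simp only [Option.getD] at h
      rw [h]
      rfl
  | none =>
      rw [hs] at h
      simp only [Option.getD] at h
      rw [h]
      rfl
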